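-- pv_equiv track=rewrite | github.com/yubocai-poly/-Design-and-Analysis-of-Algorithms | Week3/Tutorial_3/search_sol.py | cost_binary_search_real
-- ===== SOURCE A (Python) =====
-- def cost_binary_search_real(A,v):
--     if len(A) == 0: return 1
--
--     left = 0
--     right = len(A) - 1
--     cost = 0
--     while (right >= left):
--         mid = left + int((right - left)/2)
--         if (v == A[mid]):
--             return cost + 2
--
--         if (v < A[mid]):
--             right = mid - 1
--         else:
--             left = mid + 1
--         cost += 3
--
--     return cost + 1
-- ===== SOURCE B (Python) =====
-- def _trail(A, v, lo, hi):
--     # List of probed values, stopping at the first match.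
--     if lo > hi:
--         return []
--     m = (lo + hi) // 2
--     x = A[m]
--     if x == v:
--         return [x]
--     return [x] + (_trail(A, v, lo, m - 1) if v < x else _trail(A, v, m + 1, hi))
--
-- def cost_binary_search_real(A, v):
--     t = _trail(A, v, 0, len(A) - 1)
--     if not t:
--         return 1
--     if t[-1] == v:
--         return 3 * (len(t) - 1) + 2
--     return 3 * len(t) + 1
-- ===== Notes on version B (the rewrite author's own statement) =====
-- stated objective: alternative
-- what changed: Replaces A's while-loop threading a cost accumulator with a recursive helper that materialises the list of probed values (stopping at the first hit) and a top level that reads the cost off that list's length and last element; the empty-array special case disappears into the empty-trail case.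
import Mathlib
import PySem

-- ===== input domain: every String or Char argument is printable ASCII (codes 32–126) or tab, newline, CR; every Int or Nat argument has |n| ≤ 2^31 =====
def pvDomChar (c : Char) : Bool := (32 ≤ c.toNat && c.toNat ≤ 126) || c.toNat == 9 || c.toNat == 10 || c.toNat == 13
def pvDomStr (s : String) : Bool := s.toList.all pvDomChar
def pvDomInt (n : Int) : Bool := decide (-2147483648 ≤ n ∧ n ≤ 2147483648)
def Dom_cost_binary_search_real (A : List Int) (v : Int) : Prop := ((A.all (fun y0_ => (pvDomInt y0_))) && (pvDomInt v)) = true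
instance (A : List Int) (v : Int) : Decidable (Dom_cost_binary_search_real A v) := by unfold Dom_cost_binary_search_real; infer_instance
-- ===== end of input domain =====

-- B replaces A's accumulator while-loop by a recursive helper that materialises the list of
-- probed values; the cost is read off that list's length and last element (objective: alternative).


-- ===== PORT A =====
-- A's while-loop, state (left, right, cost); int((right-left)/2) is truncating division,
-- exact here as Int '/' since right - left ≥ 0 whenever the midpoint is computed.
-- The Nat fuel (wrapper passes A.length, an upper bound on the range size, which shrinks
-- every iteration) only makes the recursion structural; it never changes the result.
def costLoopA (A : List Int) (v : Int) : Nat → Int → Int → Int → Int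
  | 0, _left, _right, cost => cost + 1
  | fuel + 1, left, right, cost =>
    if right ≥ left then
      let mid := left + (right - left) / 2
      match PySem.List.pyGet? A mid with
      | none => 0   -- IndexError; unreachable from the wrapper's initial bounds
      | some x =>
        if v == x then cost + 2
        else if v < x then costLoopA A v fuel left (mid - 1) (cost + 3)
        else costLoopA A v fuel (mid + 1) right (cost + 3)
    else cost + 1

def cost_binary_search_real (A : List Int) (v : Int) : Int :=
  if A.length = 0 then 1
  else costLoopA A v A.length 0 ((A.length : Int) - 1) 0

-- ===== PORT B =====
-- B's helper: the list of probed values, stopping at the first hit (same fuel device).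
def trailB (A : List Int) (v : Int) : Nat → Int → Int → List Int
  | 0, _lo, _hi => []
  | fuel + 1, lo, hi =>
    if lo > hi then []
    else
      let m := PySem.Int.floordiv (lo + hi) 2
      match PySem.List.pyGet? A m with
      | none => []   -- IndexError; unreachable from the wrapper's initial bounds
      | some x =>
        if x == v then [x]
        else x :: (if v < x then trailB A v fuel lo (m - 1) else trailB A v fuel (m + 1) hi)

def cost_binary_search_real_alt (A : List Int) (v : Int) : Int :=
  let t := trailB A v A.length 0 ((A.length : Int) - 1)
  match t.getLast? with
  | none => 1
  | some x => if x == v then 3 * ((t.length : Int) - 1) + 2 else 3 * (t.length : Int) + 1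

-- ===== PRECONDITION & SPEC =====
def Spec_cost_binary_search_real (A : List Int) (v : Int) (out : Int) : Prop := out = cost_binary_search_real_alt A v
instance (A : List Int) (v : Int) (out : Int) : Decidable (Spec_cost_binary_search_real A v out) := by unfold Spec_cost_binary_search_real; infer_instance

-- ===== CLAIM (what is proved, stated in full; the proofs are below) =====
def Claim_equal_cost_binary_search_real : Prop := ∀ (A : List Int) (v : Int), Dom_cost_binary_search_real A v → Spec_cost_binary_search_real A v (cost_binary_search_real A v)

-- ===== LEMMAS AND PROOFS =====

-- The score B's top level reads off a trail.
def scoreB (v : Int) (t : List Int) : Int :=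
  match t.getLast? with
  | none => 1
  | some x => if x == v then 3 * ((t.length : Int) - 1) + 2 else 3 * (t.length : Int) + 1

theorem scoreB_cons (v x : Int) (t : List Int) (hx : ¬ x = v) :
    scoreB v (x :: t) = scoreB v t + 3 := by
  cases t with
  | nil => simp [scoreB, hx]
  | cons y t' =>
    simp only [scoreB, List.getLast?_cons_cons, List.length_cons]
    cases h : (y :: t').getLast? with
    | none => simp [List.getLast?_cons] at h
    | some z =>
      by_cases hz : z = v <;> simp [hz] <;> ring

-- A's loop computes cost + the score of B's trail, on in-range loop states,
-- for any sufficient amounts of fuel on either side.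
theorem costLoopA_eq_scoreB (A : List Int) (v : Int) :
    ∀ (fuel fuel' : Nat) (left right cost : Int),
      (right - left + 1).toNat ≤ fuel → (right - left + 1).toNat ≤ fuel' →
      0 ≤ left → right < (A.length : Int) →
      costLoopA A v fuel left right cost = cost + scoreB v (trailB A v fuel' left right) := by
  intro fuel
  induction fuel with
  | zero =>
    intro fuel' left right cost hf hf' _ _
    have h2 : left > right := by omega
    cases fuel' with
    | zero => simp [costLoopA, trailB, scoreB]
    | succ n =>
      simp [costLoopA, trailB, h2, scoreB]
  | succ fuel ih =>
    intro fuel' left right cost hf hf' hl hr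
    by_cases h : right ≥ left
    · obtain ⟨n, rfl⟩ : ∃ n, fuel' = n + 1 := ⟨fuel' - 1, by omega⟩
      have h2 : ¬ left > right := by omega
      rw [costLoopA, trailB]
      simp only [h, if_pos, h2, if_neg, not_false_iff]
      have hfd : PySem.Int.floordiv (left + right) 2 = (left + right) / 2 :=
        PySem.Int.floordiv_eq_ediv_of_pos (by omega)
      have hmids : left + (right - left) / 2 = (left + right) / 2 := by omega
      rw [hfd, hmids]
      have hmid : left ≤ (left + right) / 2 ∧ (left + right) / 2 ≤ right := by omega
      cases hget : PySem.List.pyGet? A ((left + right) / 2) with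
      | none =>
        exfalso
        rw [PySem.List.pyGet?_eq_none_iff] at hget
        exact hget (by simp [PySem.Raise.InRange]; omega)
      | some x =>
        simp only
        by_cases hv : v = x
        · simp [hv, scoreB]
        · have hvx : (v == x) = false := by simp [hv]
          have hxv : (x == v) = false := by simp [Ne.symm hv]
          simp only [hvx, hxv, Bool.false_eq_true, if_false]
          rw [scoreB_cons v x _ (Ne.symm hv)]
          by_cases hlt : v < x
          · rw [if_pos hlt, if_pos hlt,
              ih n left ((left + right) / 2 - 1) (cost + 3) (by omega) (by omega) hl (by omega)]
            ring
          · rw [if_neg hlt, if_neg hlt,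
              ih n ((left + right) / 2 + 1) right (cost + 3) (by omega) (by omega) (by omega) hr]
            ring
    · have h2 : left > right := by omega
      cases fuel' with
      | zero => simp [costLoopA, trailB, h2, scoreB]
      | succ n => simp [costLoopA, trailB, h2, scoreB]

-- ===== VERDICT (by name: the statement is the Claim_ definition above) =====
theorem cost_binary_search_real_spec : Claim_equal_cost_binary_search_real := by
  intro A v _
  unfold Spec_cost_binary_search_real cost_binary_search_real cost_binary_search_real_alt
  by_cases hl : A.length = 0
  · simp only [hl, if_pos]
    simp [trailB]
  · simp only [hl, if_neg, not_false_iff]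
    rw [costLoopA_eq_scoreB A v A.length A.length 0 ((A.length : Int) - 1) 0
      (by omega) (by omega) (by omega) (by omega)]
    simp [scoreB]
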